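-- pv_equiv track=rewrite | github.com/aquach/cryptogram-solver | sub_solver.py | hash_word
-- ===== SOURCE A (Python) =====
-- def hash_word(word):
--     """Hashes a word into its similarity equivalent.
--
--     MXM becomes 010, ASDF becomes 0123, AFAFA becomes 01010, etc.
--     """
--
--     seen = {}
--     out = []
--     i = 0
--     for c in word:
--         if c not in seen:
--             seen[c] = str(i)
--             i += 1
--         out.append(seen[c])
--     return ''.join(out)
-- ===== SOURCE B (Python) =====
-- def hash_word(word):
--     """Hashes a word into its similarity equivalent.
--
--     The code for each character is the number of distinct characters that
--     occur strictly before its first occurrence: no dict and no running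
--     counter, just a per-character closed form.
--     """
--     return ''.join(str(len(set(word[:word.index(c)]))) for c in word)
-- ===== Notes on version B (the rewrite author's own statement) =====
-- stated objective: alternative
-- what changed: A threads a seen-dict and a running counter through one stateful loop; B is a stateless per-character closed form: each character's code is len(set(word[:word.index(c)])), the number of distinct characters before its first occurrence, so no dict or counter is maintained at all.
import Mathlib
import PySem

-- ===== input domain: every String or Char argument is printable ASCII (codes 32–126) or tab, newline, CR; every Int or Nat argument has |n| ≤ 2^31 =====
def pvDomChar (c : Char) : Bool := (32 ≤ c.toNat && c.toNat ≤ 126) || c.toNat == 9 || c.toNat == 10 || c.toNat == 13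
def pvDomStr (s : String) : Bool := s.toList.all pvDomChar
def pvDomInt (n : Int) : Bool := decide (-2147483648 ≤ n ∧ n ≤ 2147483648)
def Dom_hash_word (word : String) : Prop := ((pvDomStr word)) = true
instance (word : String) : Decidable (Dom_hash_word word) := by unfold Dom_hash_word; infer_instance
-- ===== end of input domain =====

-- B replaces A's stateful seen-dict-plus-counter loop by a stateless per-character closed form (rank = number of distinct characters before the first occurrence); alternative algorithm, return values proved equal.


-- ===== PORT A =====
-- A's loop: seen dict grown lazily (value str(i) at first sight), out list appended each step.
-- 'out.append(seen[c])' is ported as getD … "" : the key c is always present at that point, so the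
-- default is never consulted and the port is exact.
def hash_word (word : String) : String :=
  let st := word.toList.foldl
    (fun (st : PySem.Dict Char String × List String × Int) c =>
      match st with
      | (seen, out, i) =>
        if seen.contains c then
          (seen, out ++ [seen.getD c ""], i)
        else
          let seen' := seen.insert c (PySem.Int.toStr i)
          (seen', out ++ [seen'.getD c ""], i + 1))
    (PySem.Dict.empty, ([] : List String), (0 : Int))
  PySem.Str.join "" st.2.1

-- ===== PORT B =====
-- ''.join(str(len(set(word[:word.index(c)]))) for c in word): for each character c,
-- word.index(c) is the index of c's first occurrence — ported as toList.idxOf, exact because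
-- c ∈ word so str.index never raises; word[:k] is take k, set(...) is PySem.Set.ofList,
-- len is .length.
def hash_word_alt (word : String) : String :=
  PySem.Str.join "" (word.toList.map (fun c =>
    PySem.Int.toStr (((PySem.Set.ofList (word.toList.take (word.toList.idxOf c))).length : Nat) : Int)))

-- ===== PRECONDITION & SPEC =====
def Spec_hash_word (word : String) (out : String) : Prop := out = hash_word_alt word
instance (word : String) (out : String) : Decidable (Spec_hash_word word out) := by unfold Spec_hash_word; infer_instance

-- ===== CLAIM (what is proved, stated in full; the proofs are below) =====
def Claim_equal_hash_word : Prop := ∀ (word : String), Dom_hash_word word → Spec_hash_word word (hash_word word)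

-- ===== LEMMAS AND PROOFS =====

-- the index table grown by A's loop, as a function of the distinct chars seen so far
def pvDictOf (d : List Char) : PySem.Dict Char String :=
  (PySem.List.enumerate d 0).foldl
    (fun (dd : PySem.Dict Char String) p => dd.insert p.2 (PySem.Int.toStr p.1)) PySem.Dict.empty

lemma pvKeys_dictOf (d : List Char) (hd : d.Nodup) : (pvDictOf d).keys = d := by
  unfold pvDictOf
  rw [PySem.Dict.keys_foldl_insert_key]
  simp [PySem.List.map_snd_enumerate, PySem.Set.update_nil_left,
    PySem.Set.ofList_eq_self_of_nodup d hd]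

lemma pvContains_dictOf (d : List Char) (hd : d.Nodup) (c : Char) :
    (pvDictOf d).contains c = decide (c ∈ d) := by
  rw [PySem.Dict.contains_eq_decide_mem_keys, pvKeys_dictOf d hd]

lemma pvGetD_dictOf (d : List Char) (hd : d.Nodup) (c : Char) (hc : c ∈ d) :
    (pvDictOf d).getD c "" = PySem.Int.toStr ((d.idxOf c : Nat) : Int) := by
  have hlt : d.idxOf c < d.length := List.idxOf_lt_length_of_mem hc
  have hmem : ((d.idxOf c : Int), c) ∈ PySem.List.enumerate d 0 := by
    rw [PySem.List.mem_enumerate_iff]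
    exact ⟨d.idxOf c, hlt, by simp [List.getElem_idxOf]⟩
  have hnd : (pvDictOf d).keys.Nodup := by rw [pvKeys_dictOf d hd]; exact hd
  have hitems : (c, PySem.Int.toStr ((d.idxOf c : Nat) : Int)) ∈ (pvDictOf d).items := by
    unfold pvDictOf
    rw [PySem.Dict.items_foldl_insert_fresh (PySem.List.enumerate d 0)
      (fun p => p.2) (fun p => PySem.Int.toStr p.1) PySem.Dict.empty
      (fun a _ => PySem.Dict.contains_empty a.2)
      (by rw [PySem.List.map_snd_enumerate]; exact hd)]
    simp only [show (PySem.Dict.empty : PySem.Dict Char String).items = [] from rfl, List.nil_append, List.mem_map]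
    exact ⟨((d.idxOf c : Int), c), hmem, rfl⟩
  exact PySem.Dict.getD_of_mem_items _ hitems hnd ""

lemma pvDictOf_snoc (d : List Char) (c : Char) :
    pvDictOf (d ++ [c]) = (pvDictOf d).insert c (PySem.Int.toStr (d.length : Int)) := by
  unfold pvDictOf
  rw [PySem.List.enumerate_append, List.foldl_append]
  simp [PySem.List.enumerate_cons, PySem.List.enumerate_nil]

lemma pvPrefix_foldl_add (l : List Char) : ∀ d : List Char, d <+: l.foldl PySem.Set.add d := by
  induction l with
  | nil => intro d; simp
  | cons c l ih =>
    intro d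
    refine List.IsPrefix.trans ?_ (ih (PySem.Set.add d c))
    rw [PySem.Set.add_eq_ite]
    split
    · exact List.prefix_refl d
    · exact List.prefix_append d [c]

-- A's loop, characterised: starting from the table of a duplicate-free seen-list d, it emits the
-- rank (index in the final first-occurrence order) of each character.
lemma pvLoopA (l : List Char) : ∀ (d : List Char) (acc : List String), d.Nodup →
    l.foldl
      (fun (st : PySem.Dict Char String × List String × Int) c =>
        match st with
        | (seen, out, i) =>
          if seen.contains c then
            (seen, out ++ [seen.getD c ""], i)
          else
            let seen' := seen.insert c (PySem.Int.toStr i)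
            (seen', out ++ [seen'.getD c ""], i + 1))
      (pvDictOf d, acc, (d.length : Int)) =
    (pvDictOf (l.foldl PySem.Set.add d),
     acc ++ l.map (fun c => PySem.Int.toStr (((l.foldl PySem.Set.add d).idxOf c : Nat) : Int)),
     ((l.foldl PySem.Set.add d).length : Int)) := by
  induction l with
  | nil => intro d acc hd; simp
  | cons c l ih =>
    intro d acc hd
    rw [List.foldl_cons, List.foldl_cons]
    by_cases hc : c ∈ d
    · have hidx : d.idxOf c = (l.foldl PySem.Set.add d).idxOf c :=
        (pvPrefix_foldl_add l d).idxOf_eq_of_mem hc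
      show List.foldl (fun (st : PySem.Dict Char String × List String × Int) c =>
        match st with
        | (seen, out, i) =>
          if seen.contains c then
            (seen, out ++ [seen.getD c ""], i)
          else
            let seen' := seen.insert c (PySem.Int.toStr i)
            (seen', out ++ [seen'.getD c ""], i + 1))
        (if (pvDictOf d).contains c then
            (pvDictOf d, acc ++ [(pvDictOf d).getD c ""], (d.length : Int))
          else
            let seen' := (pvDictOf d).insert c (PySem.Int.toStr (d.length : Int))
            (seen', acc ++ [seen'.getD c ""], (d.length : Int) + 1))
        l = _
      rw [pvContains_dictOf d hd c, if_pos (by simp [hc]), pvGetD_dictOf d hd c hc,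
        ih d _ hd, PySem.Set.add_of_mem hc]
      simp [hidx, List.append_assoc]
    · have hnd' : (d ++ [c]).Nodup := by
        refine List.Nodup.append hd (List.nodup_singleton c) ?_
        rw [List.disjoint_singleton]
        exact hc
      have hcmem : c ∈ d ++ [c] := by simp
      have hidx2 : (d ++ [c]).idxOf c = (l.foldl PySem.Set.add (d ++ [c])).idxOf c :=
        (pvPrefix_foldl_add l (d ++ [c])).idxOf_eq_of_mem hcmem
      show List.foldl (fun (st : PySem.Dict Char String × List String × Int) c =>
        match st with
        | (seen, out, i) =>
          if seen.contains c then
            (seen, out ++ [seen.getD c ""], i)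
          else
            let seen' := seen.insert c (PySem.Int.toStr i)
            (seen', out ++ [seen'.getD c ""], i + 1))
        (if (pvDictOf d).contains c then
            (pvDictOf d, acc ++ [(pvDictOf d).getD c ""], (d.length : Int))
          else
            let seen' := (pvDictOf d).insert c (PySem.Int.toStr (d.length : Int))
            (seen', acc ++ [seen'.getD c ""], (d.length : Int) + 1))
        l = _
      rw [pvContains_dictOf d hd c, if_neg (by simp [hc])]
      show List.foldl (fun (st : PySem.Dict Char String × List String × Int) c =>
        match st with
        | (seen, out, i) =>
          if seen.contains c then
            (seen, out ++ [seen.getD c ""], i)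
          else
            let seen' := seen.insert c (PySem.Int.toStr i)
            (seen', out ++ [seen'.getD c ""], i + 1))
        ((pvDictOf d).insert c (PySem.Int.toStr (d.length : Int)),
          acc ++ [((pvDictOf d).insert c (PySem.Int.toStr (d.length : Int))).getD c ""],
          (d.length : Int) + 1)
        l = _
      rw [← pvDictOf_snoc d c, pvGetD_dictOf (d ++ [c]) hnd' c hcmem]
      have hlen : (d.length : Int) + 1 = ((d ++ [c]).length : Int) := by simp
      rw [hlen, ih (d ++ [c]) _ hnd', PySem.Set.add_of_not_mem hc]
      simp [← hidx2, List.append_assoc]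

-- B's closed form, characterised: the number of distinct characters strictly before the first
-- occurrence of c equals c's index in the first-occurrence (dedup) order.
lemma pvRank (l : List Char) : ∀ (d : List Char), d.Nodup → ∀ c, c ∈ l → c ∉ d →
    (List.foldl PySem.Set.add d (l.take (l.idxOf c))).length =
      (List.foldl PySem.Set.add d l).idxOf c := by
  induction l with
  | nil => intro d _ c hc; exact absurd hc (List.not_mem_nil)
  | cons a t ih =>
    intro d hd c hc hcd
    by_cases hca : c = a
    · subst hca
      rw [List.idxOf_cons_self, List.take_zero, List.foldl_nil, List.foldl_cons,
        PySem.Set.add_of_not_mem hcd]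
      rw [← (pvPrefix_foldl_add t (d ++ [c])).idxOf_eq_of_mem (by simp)]
      rw [List.idxOf_append_of_notMem hcd]
      simp
    · have hct : c ∈ t := by
        rcases List.mem_cons.mp hc with h | h
        · exact absurd h hca
        · exact h
      rw [List.idxOf_cons_ne _ (by exact fun h => hca h.symm), List.take_succ_cons,
        List.foldl_cons, List.foldl_cons]
      by_cases had : a ∈ d
      · rw [PySem.Set.add_of_mem had]
        exact ih d hd c hct hcd
      · rw [PySem.Set.add_of_not_mem had]
        have hnd' : (d ++ [a]).Nodup := by
          refine List.Nodup.append hd (List.nodup_singleton a) ?_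
          rw [List.disjoint_singleton]; exact had
        exact ih (d ++ [a]) hnd' c hct (by simp [hcd, hca])

-- ===== VERDICT (by name: the statement is the Claim_ definition above) =====
theorem hash_word_spec : Claim_equal_hash_word := by
  intro word _
  show hash_word word = hash_word_alt word
  have hded : word.toList.foldl PySem.Set.add [] = PySem.List.dedup word.toList := by
    simp [PySem.List.dedup_eq_ofList, PySem.Set.ofList_eq_foldl]
  have hA := pvLoopA word.toList [] [] List.nodup_nil
  simp only [List.length_nil, Nat.cast_zero] at hA
  have hA' : hash_word word = PySem.Str.join ""
      (word.toList.map (fun c =>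
        PySem.Int.toStr (((word.toList.foldl PySem.Set.add []).idxOf c : Nat) : Int))) := by
    unfold hash_word
    rw [show (PySem.Dict.empty : PySem.Dict Char String) = pvDictOf [] from rfl, hA]
    simp
  rw [hA']
  unfold hash_word_alt
  congr 1
  apply List.map_congr_left
  intro c hcw
  rw [show PySem.Set.ofList (word.toList.take (word.toList.idxOf c)) =
      List.foldl PySem.Set.add [] (word.toList.take (word.toList.idxOf c)) from
    PySem.Set.ofList_eq_foldl _]
  rw [pvRank word.toList [] List.nodup_nil c hcw (List.not_mem_nil)]
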